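-- pv_equiv track=rewrite | github.com/benjaminbolling/RSW | src/IO.py | insertFreeDaysInSolutionMatrix
-- ===== SOURCE A (Python) =====
-- def insertFreeDaysInSolutionMatrix(input,zeroOneS):
--     ind = -1
--     matrixOut = []
--     for m in range(len(zeroOneS)):
--         if zeroOneS[m] == 1:
--             ind += 1
--             matrixOut.append(input[ind])
--         else:
--             matrixOut.append(0)
--     return matrixOut
-- ===== SOURCE B (Python) =====
-- def insertFreeDaysInSolutionMatrix(input, zeroOneS):
--     result = [0] * len(zeroOneS)
--     ones = [m for m in range(len(zeroOneS)) if zeroOneS[m] == 1]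
--     for pos, val in zip(ones, input):
--         result[pos] = val
--     return result
-- ===== Notes on version B (the rewrite author's own statement) =====
-- stated objective: alternative
-- what changed: B preallocates a zero-filled result and scatters the input values into the positions of the ones (collected in one comprehension), instead of A's append-per-slot loop with a running input counter.
import Mathlib
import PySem

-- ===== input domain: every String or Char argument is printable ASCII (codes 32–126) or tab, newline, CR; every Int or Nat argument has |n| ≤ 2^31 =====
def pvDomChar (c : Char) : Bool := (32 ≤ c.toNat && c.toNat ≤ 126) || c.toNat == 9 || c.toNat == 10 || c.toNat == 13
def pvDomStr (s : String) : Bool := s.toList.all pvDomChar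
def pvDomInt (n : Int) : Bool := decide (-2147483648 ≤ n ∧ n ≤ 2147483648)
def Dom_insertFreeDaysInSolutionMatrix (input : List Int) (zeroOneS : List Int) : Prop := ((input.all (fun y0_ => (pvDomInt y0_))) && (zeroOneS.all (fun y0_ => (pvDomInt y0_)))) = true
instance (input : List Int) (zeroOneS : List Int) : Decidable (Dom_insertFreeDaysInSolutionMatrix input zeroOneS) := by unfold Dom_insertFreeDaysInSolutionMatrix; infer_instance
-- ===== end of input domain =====

-- B preallocates a zero result and scatters input values into the one-positions (alternative decomposition, same cost). Return-value equivalence on Pre_ (A raises IndexError outside it).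


-- ===== PORT A =====
-- for m in range(len(zeroOneS)): if zeroOneS[m]==1: ind+=1; append(input[ind]) else append(0)
-- input[ind] is pyGetD (total form); Pre_ guarantees ind is in range wherever it is read.
def insertFreeDaysInSolutionMatrix (input : List Int) (zeroOneS : List Int) : List Int :=
  ((PySem.List.pyRange 0 (zeroOneS.length : Int) 1).foldl
    (fun (st : Int × List Int) m =>
      if PySem.List.pyGetD zeroOneS m 0 == 1 then
        (st.1 + 1, st.2 ++ [PySem.List.pyGetD input (st.1 + 1) 0])
      else
        (st.1, st.2 ++ [0]))
    ((-1 : Int), ([] : List Int))).2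

-- ===== PORT B =====
-- ones = [m for m in range(len(zeroOneS)) if zeroOneS[m] == 1]
def pvOnes (zeroOneS : List Int) : List Nat :=
  (List.range zeroOneS.length).filter (fun m => zeroOneS.getD m 0 == 1)

-- result = [0]*len(zeroOneS); for pos, val in zip(ones, input): result[pos] = val
def insertFreeDaysInSolutionMatrix_alt (input : List Int) (zeroOneS : List Int) : List Int :=
  ((pvOnes zeroOneS).zip input).foldl
    (fun res pv => res.set pv.1 pv.2)
    (List.replicate zeroOneS.length 0)

-- ===== PRECONDITION & SPEC =====
-- Pre_ excludes exactly the inputs with more ones in zeroOneS than entries of input, on which Python A raises IndexError.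
def Pre_insertFreeDaysInSolutionMatrix (input : List Int) (zeroOneS : List Int) : Prop :=
  zeroOneS.count 1 ≤ input.length
instance (input : List Int) (zeroOneS : List Int) : Decidable (Pre_insertFreeDaysInSolutionMatrix input zeroOneS) := by unfold Pre_insertFreeDaysInSolutionMatrix; infer_instance

def pvWitness_insertFreeDaysInSolutionMatrix : List Int × List Int := ([5, 7], [1, 0, 1])

def Spec_insertFreeDaysInSolutionMatrix (input : List Int) (zeroOneS : List Int) (out : List Int) : Prop := out = insertFreeDaysInSolutionMatrix_alt input zeroOneS
instance (input : List Int) (zeroOneS : List Int) (out : List Int) : Decidable (Spec_insertFreeDaysInSolutionMatrix input zeroOneS out) := by unfold Spec_insertFreeDaysInSolutionMatrix; infer_instance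

-- ===== CLAIM (what is proved, stated in full; the proofs are below) =====
def Claim_equal_insertFreeDaysInSolutionMatrix : Prop := ∀ (input : List Int) (zeroOneS : List Int), Dom_insertFreeDaysInSolutionMatrix input zeroOneS → Pre_insertFreeDaysInSolutionMatrix input zeroOneS → Spec_insertFreeDaysInSolutionMatrix input zeroOneS (insertFreeDaysInSolutionMatrix input zeroOneS)

-- ===== LEMMAS AND PROOFS =====

-- Common characterisation: consume inp left to right, emitting its next entry at each 1 of zs.
def pvG (inp : List Int) : List Int → List Int
  | [] => []
  | z :: zs => if z = 1 then inp.headD 0 :: pvG inp.tail zs else 0 :: pvG inp zs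

theorem pvG_nil (zs : List Int) : pvG [] zs = List.replicate zs.length 0 := by
  induction zs with
  | nil => rfl
  | cons z zs ih => simp [pvG, ih, List.replicate_succ]

theorem pvA_char (input : List Int) (zs : List Int) : ∀ (m : Nat) (acc : List Int),
    (zs.foldl
      (fun (st : Int × List Int) z =>
        if z == 1 then (st.1 + 1, st.2 ++ [PySem.List.pyGetD input (st.1 + 1) 0])
        else (st.1, st.2 ++ [0]))
      ((m : Int) - 1, acc)).2 = acc ++ pvG (input.drop m) zs := by
  induction zs with
  | nil => intro m acc; simp [pvG]
  | cons z zs ih =>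
    intro m acc
    by_cases hz : z = 1
    · have hidx : (m : Int) - 1 + 1 = ((m + 1 : Nat) : Int) - 1 := by push_cast; ring
      have hget : PySem.List.pyGetD input ((m : Int) - 1 + 1) 0 = (input.drop m).headD 0 := by
        have : (m : Int) - 1 + 1 = (m : Int) := by ring
        rw [this, PySem.List.pyGetD_natCast]
        simp [List.getD_eq_getElem?_getD, List.head?_drop]
      simp only [List.foldl_cons, hz, beq_self_eq_true, if_true, hget]
      rw [hidx, ih (m + 1)]
      simp [pvG, List.tail_drop]
    · have hz' : (z == 1) = false := by simp [hz]
      simp only [List.foldl_cons, hz', Bool.false_eq_true, if_false]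
      rw [ih m]
      simp [pvG, hz]

theorem pvShift (l : List (Nat × Int)) : ∀ (x : Int) (r : List Int),
    ((l.map (Prod.map Nat.succ id)).foldl (fun res pv => res.set pv.1 pv.2) (x :: r))
      = x :: l.foldl (fun res pv => res.set pv.1 pv.2) r := by
  induction l with
  | nil => intro x r; rfl
  | cons p l ih => intro x r; cases p with | mk a b => simp [ih]

theorem pvOnes_cons (z : Int) (zs : List Int) :
    pvOnes (z :: zs)
      = (if z = 1 then [0] else []) ++ (pvOnes zs).map Nat.succ := by
  unfold pvOnes
  rw [List.length_cons, List.range_succ_eq_map, List.filter_cons, List.filter_map]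
  have hpred : ∀ m : Nat, (Function.comp (fun m => (z :: zs).getD m 0 == 1) Nat.succ) m
      = (fun m => zs.getD m 0 == 1) m := by intro m; simp [Function.comp]
  rw [List.filter_congr (fun m _ => hpred m)]
  by_cases hz : z = 1 <;> simp [hz]

theorem pvB_char (zs : List Int) : ∀ (inp : List Int),
    ((pvOnes zs).zip inp).foldl (fun res pv => res.set pv.1 pv.2) (List.replicate zs.length 0)
      = pvG inp zs := by
  induction zs with
  | nil => intro inp; simp [pvOnes, pvG]
  | cons z zs ih =>
    intro inp
    rw [pvOnes_cons, List.length_cons, List.replicate_succ]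
    by_cases hz : z = 1
    · simp only [hz, if_true]
      cases inp with
      | nil => simp [pvG, pvG_nil]
      | cons v inp' =>
        simp only [List.cons_append, List.nil_append, List.zip_cons_cons, List.foldl_cons]
        have hmap : (((pvOnes zs).map Nat.succ).zip inp')
            = ((pvOnes zs).zip inp').map (Prod.map Nat.succ id) := by
          rw [List.zip_map_left]
        simp only [List.set_cons_zero, hmap, pvShift, ih inp']
        simp [pvG]
    · simp only [hz, if_false, List.nil_append]
      have hmap : (((pvOnes zs).map Nat.succ).zip inp)
          = ((pvOnes zs).zip inp).map (Prod.map Nat.succ id) := by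
        rw [List.zip_map_left]
      rw [hmap, pvShift, ih inp]
      simp [pvG, hz]

-- ===== VERDICT (by name: the statement is the Claim_ definition above) =====
theorem insertFreeDaysInSolutionMatrix_spec : Claim_equal_insertFreeDaysInSolutionMatrix := by
  intro input zeroOneS _ _
  unfold Spec_insertFreeDaysInSolutionMatrix insertFreeDaysInSolutionMatrix insertFreeDaysInSolutionMatrix_alt
  rw [PySem.List.foldl_pyRange_zero_pyGetD' zeroOneS 0
    (fun (st : Int × List Int) z =>
      if z == 1 then (st.1 + 1, st.2 ++ [PySem.List.pyGetD input (st.1 + 1) 0])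
      else (st.1, st.2 ++ [0]))
    ((-1 : Int), ([] : List Int))]
  have h0 : ((-1 : Int)) = ((0 : Nat) : Int) - 1 := by norm_num
  rw [h0, pvA_char input zeroOneS 0 [], pvB_char zeroOneS input]
  simp
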